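-- pv_equiv track=rewrite | github.com/sudo2182/Placement-Navigator | backend/services/matching_service.py | _extract_matched_skills
-- ===== SOURCE A (Python) =====
-- from typing import Dict, List, Optional, Tuple, Any
--
-- def _extract_matched_skills(
--
--     student_skills: List[str],
--     job_requirements: List[str]
-- ) -> List[str]:
--     """
--     Find overlapping skills between student and job requirements
--
--     Args:
--         student_skills: List of student skills
--         job_requirements: List of job requirements
--
--     Returns:
--         List of matched skills
--     """
--     if not student_skills or not job_requirements:
--         return []
--
--     # Normalize skills to lowercase
--     student_skills_lower = [skill.lower().strip() for skill in student_skills]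
--
--     # Handle different requirement formats
--     if isinstance(job_requirements, str):
--         job_requirements = [job_requirements]
--
--     job_requirements_lower = [req.lower().strip() for req in job_requirements]
--
--     # Find exact matches
--     exact_matches = list(set(student_skills_lower) & set(job_requirements_lower))
--
--     # Find partial matches
--     partial_matches = []
--     for student_skill in student_skills_lower:
--         for job_req in job_requirements_lower:
--             if (student_skill in job_req or job_req in student_skill) and \
--                student_skill not in exact_matches and \
--                job_req not in partial_matches:
--                 partial_matches.append(student_skill)
--                 break
--
--     # Return original case skills
--     matched_skills = []
--     all_matches = exact_matches + partial_matches
--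
--     for skill in student_skills:
--         if skill.lower().strip() in all_matches:
--             matched_skills.append(skill)
--
--     return matched_skills
-- ===== SOURCE B (Python) =====
-- from typing import Dict, List, Optional, Tuple, Any
--
-- def _extract_matched_skills(
--     student_skills: List[str],
--     job_requirements: List[str]
-- ) -> List[str]:
--     """Single-pass re-implementation: a normalized skill is matched iff it is
--     substring-related to some normalized requirement (exact matches are a
--     special case of that, and A's `job_req not in partial_matches` guard is
--     always true), so one scan over the original skills suffices."""
--     reqs = [req.lower().strip() for req in job_requirements]
--     matched = []
--     for skill in student_skills:
--         s = skill.lower().strip()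
--         if any(s in r or r in s for r in reqs):
--             matched.append(skill)
--     return matched
-- ===== Notes on version B (the rewrite author's own statement) =====
-- stated objective: simpler
-- what changed: Replaced A's three phases (set-intersection exact matches, stateful break-loop with list-membership guards for partial matches, merge + rebuild pass) with one pass over the original skills testing substring-relatedness to any normalized requirement, which provably subsumes all three.
import Mathlib
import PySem

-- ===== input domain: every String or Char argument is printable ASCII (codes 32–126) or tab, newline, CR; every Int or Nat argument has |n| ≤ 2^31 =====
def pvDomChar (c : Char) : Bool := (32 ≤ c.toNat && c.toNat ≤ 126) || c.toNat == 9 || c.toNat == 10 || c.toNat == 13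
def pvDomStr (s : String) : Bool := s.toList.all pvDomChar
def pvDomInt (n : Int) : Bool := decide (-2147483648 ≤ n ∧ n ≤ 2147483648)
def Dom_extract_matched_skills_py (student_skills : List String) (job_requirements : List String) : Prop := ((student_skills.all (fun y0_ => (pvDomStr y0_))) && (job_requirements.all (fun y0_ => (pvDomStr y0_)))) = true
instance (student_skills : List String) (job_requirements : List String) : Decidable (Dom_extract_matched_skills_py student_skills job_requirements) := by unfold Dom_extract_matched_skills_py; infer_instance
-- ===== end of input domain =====

-- B replaces A's three phases (set-intersection exact matches, break-loop partial matches,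
-- merge + rebuild pass) with one pass testing substring-relatedness; objective: simpler.

-- ===== PORT A =====
-- skill.lower().strip()
def pvNorm (s : String) : String := PySem.Str.strip (PySem.Str.lower s)

-- inner 'for job_req in job_requirements_lower: if …: append; break' loop of A
def pvInnerA (exact : List String) (pm : List String) (s : String) : List String → List String
  | [] => pm
  | j :: rest =>
    if ((PySem.Str.isIn s j || PySem.Str.isIn j s) && !(exact.contains s) && !(pm.contains j))
    then pm ++ [s]
    else pvInnerA exact pm s rest

def extract_matched_skills_py (student_skills : List String) (job_requirements : List String) : List String :=
  if student_skills = [] ∨ job_requirements = [] then []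
  else
    let student_skills_lower := student_skills.map pvNorm
    -- `isinstance(job_requirements, str)` is always False under the type convention (a List String)
    let job_requirements_lower := job_requirements.map pvNorm
    -- list(set(a) & set(b)); A uses exact_matches only through membership tests ('in'),
    -- so CPython's hash iteration order is irrelevant to the returned value
    let exact_matches : List String :=
      PySem.Set.inter (PySem.Set.ofList student_skills_lower) (PySem.Set.ofList job_requirements_lower)
    let partial_matches :=
      student_skills_lower.foldl (fun pm s => pvInnerA exact_matches pm s job_requirements_lower) []
    let all_matches := exact_matches ++ partial_matches
    student_skills.foldl
      (fun acc skill => if all_matches.contains (pvNorm skill) then acc ++ [skill] else acc) []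

-- ===== PORT B =====
def extract_matched_skills_py_alt (student_skills : List String) (job_requirements : List String) : List String :=
  let reqs := job_requirements.map (fun req => PySem.Str.strip (PySem.Str.lower req))
  student_skills.foldl
    (fun matched skill =>
      let s := PySem.Str.strip (PySem.Str.lower skill)
      if reqs.any (fun r => PySem.Str.isIn s r || PySem.Str.isIn r s) then matched ++ [skill]
      else matched) []

-- ===== PRECONDITION & SPEC =====
def Spec_extract_matched_skills_py (student_skills : List String) (job_requirements : List String) (out : List String) : Prop := out = extract_matched_skills_py_alt student_skills job_requirements
instance (student_skills : List String) (job_requirements : List String) (out : List String) : Decidable (Spec_extract_matched_skills_py student_skills job_requirements out) := by unfold Spec_extract_matched_skills_py; infer_instance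

-- ===== CLAIM (what is proved, stated in full; the proofs are below) =====
def Claim_equal_extract_matched_skills_py : Prop := ∀ (student_skills : List String) (job_requirements : List String), Dom_extract_matched_skills_py student_skills job_requirements → Spec_extract_matched_skills_py student_skills job_requirements (extract_matched_skills_py student_skills job_requirements)

-- ===== LEMMAS AND PROOFS =====

-- the substring-relatedness test
def pvRel (s r : String) : Bool := PySem.Str.isIn s r || PySem.Str.isIn r s

theorem pvRel_self (s : String) : pvRel s s = true := by
  have h : PySem.Str.isIn s s = true := (PySem.Str.isIn_iff_infix s s).mpr (List.infix_refl _)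
  simp only [pvRel, h, Bool.true_or]

-- the intersection membership, unfolded
theorem pv_mem_exact (ssl jrl : List String) (x : String) :
    x ∈ (PySem.Set.inter (PySem.Set.ofList ssl) (PySem.Set.ofList jrl) : List String) ↔
      x ∈ ssl ∧ x ∈ jrl := by
  rw [PySem.Set.mem_inter, PySem.Set.mem_ofList, PySem.Set.mem_ofList]

-- A's inner break-loop, assuming no requirement is already in partial_matches
theorem pvInnerA_eq (exact pm : List String) (s : String) (jrl : List String)
    (hpm : ∀ j ∈ jrl, j ∉ pm) :
    pvInnerA exact pm s jrl =
      if (jrl.any (pvRel s) && !(List.contains exact s)) = true then pm ++ [s] else pm := by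
  induction jrl with
  | nil => simp [pvInnerA]
  | cons j rest ih =>
    have hj : pm.contains j = false := by
      simpa [List.contains_eq_mem] using hpm j (by simp)
    have hrest : ∀ x ∈ rest, x ∉ pm := fun x hx => hpm x (by simp [hx])
    have hstep : pvInnerA exact pm s (j :: rest) =
        if ((PySem.Str.isIn s j || PySem.Str.isIn j s) && !(List.contains exact s) && !(pm.contains j)) = true
        then pm ++ [s] else pvInnerA exact pm s rest := rfl
    have hcons : (j :: rest).any (pvRel s)
        = ((PySem.Str.isIn s j || PySem.Str.isIn j s) || rest.any (pvRel s)) := rfl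
    rw [hstep, hj, ih hrest, hcons]
    cases hrel : (PySem.Str.isIn s j || PySem.Str.isIn j s) <;>
      cases he : List.contains exact s <;>
        cases hany : rest.any (pvRel s) <;> simp

-- invariant carried by partial_matches through A's outer loop
def pvInv (ssl jrl pm : List String) : Prop :=
  ∀ x ∈ pm, x ∈ ssl ∧ x ∉ jrl

theorem pv_no_req_in_pm (ssl jrl pm : List String) (h : pvInv ssl jrl pm) :
    ∀ j ∈ jrl, j ∉ pm := by
  intro j hj hmem
  exact (h j hmem).2 hj

-- characterisation of A's partial_matches fold
theorem pv_foldl_partial (ssl jrl : List String) (l pm : List String)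
    (hsub : ∀ x ∈ l, x ∈ ssl) (hinv : pvInv ssl jrl pm) :
    ∀ x, x ∈ l.foldl (fun pm s => pvInnerA (PySem.Set.inter (PySem.Set.ofList ssl) (PySem.Set.ofList jrl)) pm s jrl) pm ↔
      x ∈ pm ∨ (x ∈ l ∧ jrl.any (pvRel x) = true ∧ x ∉ jrl) := by
  induction l generalizing pm with
  | nil => simp
  | cons s rest ih =>
    intro x
    have hs : s ∈ ssl := hsub s (by simp)
    have hrest : ∀ y ∈ rest, y ∈ ssl := fun y hy => hsub y (by simp [hy])
    have hstep := pvInnerA_eq (PySem.Set.inter (PySem.Set.ofList ssl) (PySem.Set.ofList jrl)) pm s jrl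
      (pv_no_req_in_pm ssl jrl pm hinv)
    have hexact : List.contains (PySem.Set.inter (PySem.Set.ofList ssl) (PySem.Set.ofList jrl) : List String) s = true ↔ s ∈ jrl := by
      rw [List.contains_eq_mem, decide_eq_true_iff, pv_mem_exact]
      exact ⟨fun h => h.2, fun h => ⟨hs, h⟩⟩
    simp only [List.foldl_cons, hstep]
    cases ha : jrl.any (pvRel s) <;>
      cases he : List.contains (PySem.Set.inter (PySem.Set.ofList ssl) (PySem.Set.ofList jrl) : List String) s
    · rw [if_neg (by simp), ih pm hrest hinv]
      constructor
      · rintro (h | h)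
        · exact Or.inl h
        · exact Or.inr ⟨by simp [h.1], h.2⟩
      · rintro (h | ⟨hm, hany, hnj⟩)
        · exact Or.inl h
        · rcases (by simpa using hm : x = s ∨ x ∈ rest) with rfl | hm'
          · exact absurd hany (by simp [ha])
          · exact Or.inr ⟨hm', hany, hnj⟩
    · rw [if_neg (by simp), ih pm hrest hinv]
      constructor
      · rintro (h | h)
        · exact Or.inl h
        · exact Or.inr ⟨by simp [h.1], h.2⟩
      · rintro (h | ⟨hm, hany, hnj⟩)
        · exact Or.inl h
        · rcases (by simpa using hm : x = s ∨ x ∈ rest) with rfl | hm'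
          · exact absurd hany (by simp [ha])
          · exact Or.inr ⟨hm', hany, hnj⟩
    · -- substring-related to some requirement, and not an exact match: s is appended
      have hsj : s ∉ jrl := fun h => by rw [hexact.mpr h] at he; simp at he
      have hinv' : pvInv ssl jrl (pm ++ [s]) := by
        intro y hy
        rcases (by simpa using hy : y ∈ pm ∨ y = s) with hy' | rfl
        · exact hinv y hy'
        · exact ⟨hs, hsj⟩
      rw [if_pos (by simp), ih (pm ++ [s]) hrest hinv']
      constructor
      · rintro (h | h)
        · rcases (by simpa using h : x ∈ pm ∨ x = s) with h' | rfl
          · exact Or.inl h'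
          · exact Or.inr ⟨by simp, ha, hsj⟩
        · exact Or.inr ⟨by simp [h.1], h.2⟩
      · rintro (h | ⟨hm, hany, hnj⟩)
        · exact Or.inl (by simp [h])
        · rcases (by simpa using hm : x = s ∨ x ∈ rest) with rfl | hm'
          · exact Or.inl (by simp)
          · exact Or.inr ⟨hm', hany, hnj⟩
    · -- an exact match: nothing appended, and s is itself a requirement
      have hsj : s ∈ jrl := hexact.mp he
      rw [if_neg (by simp), ih pm hrest hinv]
      constructor
      · rintro (h | h)
        · exact Or.inl h
        · exact Or.inr ⟨by simp [h.1], h.2⟩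
      · rintro (h | ⟨hm, hany, hnj⟩)
        · exact Or.inl h
        · rcases (by simpa using hm : x = s ∨ x ∈ rest) with rfl | hm'
          · exact absurd hsj hnj
          · exact Or.inr ⟨hm', hany, hnj⟩

-- for a normalized student skill, membership in all_matches is exactly
-- substring-relatedness to some normalized requirement
theorem pv_all_matches (ssl jrl : List String) (s : String) (hs : s ∈ ssl) :
    (List.contains (PySem.Set.inter (PySem.Set.ofList ssl) (PySem.Set.ofList jrl) ++
        ssl.foldl (fun pm t => pvInnerA (PySem.Set.inter (PySem.Set.ofList ssl) (PySem.Set.ofList jrl)) pm t jrl) []) s = true) ↔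
      jrl.any (pvRel s) = true := by
  rw [List.contains_eq_mem, decide_eq_true_iff, List.mem_append,
    pv_foldl_partial ssl jrl ssl [] (fun _ h => h) (by intro x hx; simp at hx),
    pv_mem_exact]
  constructor
  · rintro (⟨_, hj⟩ | (h | ⟨_, hany, _⟩))
    · exact List.any_eq_true.mpr ⟨s, hj, pvRel_self s⟩
    · exact absurd h (by simp)
    · exact hany
  · intro hany
    by_cases hj : s ∈ jrl
    · exact Or.inl ⟨hs, hj⟩
    · exact Or.inr (Or.inr ⟨hs, hany, hj⟩)

-- ===== VERDICT (by name: the statement is the Claim_ definition above) =====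
theorem extract_matched_skills_py_spec : Claim_equal_extract_matched_skills_py := by
  intro ss jr hdom
  clear hdom
  show extract_matched_skills_py ss jr = extract_matched_skills_py_alt ss jr
  unfold extract_matched_skills_py extract_matched_skills_py_alt
  by_cases hguard : ss = [] ∨ jr = []
  · rw [if_pos hguard]
    rcases hguard with rfl | rfl
    · simp
    · induction ss with
      | nil => simp
      | cons a l ih => exact ih
  · rw [if_neg hguard]
    apply Eq.symm
    apply PySem.List.foldl_congr_mem'
    intro skill hskill acc
    have h1 := pv_all_matches (ss.map pvNorm) (jr.map pvNorm) (pvNorm skill)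
      (List.mem_map_of_mem hskill)
    rw [Bool.coe_iff_coe.mp h1]
    rfl
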